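-- pv_equiv track=rewrite | github.com/karthikpappu/pyc_source | pycfiles/tpDcc_libs_python-0.0.6-py3.6/name.cpython-36.py | find_unique_id
-- ===== SOURCE A (Python) =====
-- def find_unique_id(ids):
--     """
--     Returns a unique int ID from given ids iterable, starting from 1
--     :param ids: iterable (list, set, tuple)
--     :return: int
--     """
--     if not ids or len(ids) == 0:
--         return 1
--     ids = sorted(set(ids))
--     last_id = min(ids)
--     if last_id > 1:
--         return 1
--     for uid in ids:
--         diff = uid - last_id
--         if diff > 1:
--             return last_id + 1
--         last_id = uid
--     else:
--         return uid + 1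
-- ===== SOURCE B (Python) =====
-- def find_unique_id(ids):
--     if not ids:
--         return 1
--     s = set(ids)
--     m = min(s)
--     if m > 1:
--         return 1
--     n = m
--     while n + 1 in s:
--         n += 1
--     return n + 1
-- ===== Notes on version B (the rewrite author's own statement) =====
-- stated objective: alternative
-- what changed: B drops A's sort-the-deduplicated-ids-and-scan-adjacent-gaps pass and instead walks upward from the minimum through a hash set until the next integer is absent (O(n) vs O(n log n); the measured gap varies with the input family, so no speed is claimed).
import Mathlib
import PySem

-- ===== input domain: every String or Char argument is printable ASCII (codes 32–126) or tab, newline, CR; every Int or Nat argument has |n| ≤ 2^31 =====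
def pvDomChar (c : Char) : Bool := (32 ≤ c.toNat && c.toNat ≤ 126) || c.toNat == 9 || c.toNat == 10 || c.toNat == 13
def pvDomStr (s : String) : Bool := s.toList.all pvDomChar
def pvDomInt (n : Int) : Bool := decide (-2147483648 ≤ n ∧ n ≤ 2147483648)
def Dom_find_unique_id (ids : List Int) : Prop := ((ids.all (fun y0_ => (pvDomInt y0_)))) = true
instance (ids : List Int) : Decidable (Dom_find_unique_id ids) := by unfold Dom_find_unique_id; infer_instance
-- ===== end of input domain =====

-- B replaces A's sort of the deduplicated ids followed by an adjacent-gap scan with a direct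
-- walk upward from the minimum through the id set until the successor is absent (a different algorithm; no speed claimed).

-- ===== PORT A =====
-- A's for-loop over the sorted deduplicated ids: tracks last_id, returns last_id+1 at the
-- first gap > 1; after a full pass returns uid+1 (uid = last_id then, so last+1 here too).
def pvLoopA : Int → List Int → Int
  | last, [] => last + 1
  | last, uid :: t => if uid - last > 1 then last + 1 else pvLoopA uid t

def find_unique_id (ids : List Int) : Int :=
  if ids = [] then 1
  else
    let l := PySem.List.sorted (PySem.Set.ofList ids) (fun x => x) false
    match PySem.List.min? l (fun x => x) with
    | none => 1   -- unreachable: l is nonempty (Python's min never sees this)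
    | some last_id => if last_id > 1 then 1 else pvLoopA last_id l

-- ===== PORT B =====
-- B's 'while n + 1 in s: n += 1'; fuel = |s| bounds the walk (n+1..n+k are distinct members of s).
def pvLoopB : Nat → Int → PySem.Set Int → Int
  | 0, n, _ => n + 1
  | fuel + 1, n, s => if n + 1 ∈ s then pvLoopB fuel (n + 1) s else n + 1

def find_unique_id_alt (ids : List Int) : Int :=
  if ids = [] then 1
  else
    let s := PySem.Set.ofList ids
    match PySem.List.min? s (fun x => x) with
    | none => 1   -- unreachable: s is nonempty
    | some m => if m > 1 then 1 else pvLoopB s.length m s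

-- ===== PRECONDITION & SPEC =====
def Spec_find_unique_id (ids : List Int) (out : Int) : Prop := out = find_unique_id_alt ids
instance (ids : List Int) (out : Int) : Decidable (Spec_find_unique_id ids out) := by unfold Spec_find_unique_id; infer_instance

-- ===== CLAIM (what is proved, stated in full; the proofs are below) =====
def Claim_equal_find_unique_id : Prop := ∀ (ids : List Int), Dom_find_unique_id ids → Spec_find_unique_id ids (find_unique_id ids)

-- ===== LEMMAS AND PROOFS =====

/-- Both loops compute *the* smallest integer `r > start` absent from the relevant set;
this predicate pins it down uniquely. -/
def pvFirstFree (start : Int) (mem : Int → Prop) (r : Int) : Prop :=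
  start < r ∧ ¬ mem r ∧ ∀ k, start < k → k < r → mem k

theorem pvFirstFree_unique {start : Int} {mem : Int → Prop} {r₁ r₂ : Int}
    (h₁ : pvFirstFree start mem r₁) (h₂ : pvFirstFree start mem r₂) : r₁ = r₂ := by
  obtain ⟨ha₁, hb₁, hc₁⟩ := h₁
  obtain ⟨ha₂, hb₂, hc₂⟩ := h₂
  rcases lt_trichotomy r₁ r₂ with h | h | h
  · exact absurd (hc₂ r₁ ha₁ h) hb₁
  · exact h
  · exact absurd (hc₁ r₂ ha₂ h) hb₂

/-- A's gap scan over a strictly increasing list whose elements all exceed `last`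
returns the first integer above `last` missing from the list. -/
theorem pvLoopA_spec (L : List Int) (last : Int)
    (hs : L.Pairwise (· < ·)) (hgt : ∀ y ∈ L, last < y) :
    pvFirstFree last (· ∈ L) (pvLoopA last L) := by
  induction L generalizing last with
  | nil =>
    refine ⟨by simp [pvLoopA], by simp [pvLoopA], ?_⟩
    intro k h1 h2; simp [pvLoopA] at h2; omega
  | cons u t ih =>
    have hu : last < u := hgt u (by simp)
    have ht : ∀ y ∈ t, u < y := by
      intro y hy; exact (List.pairwise_cons.mp hs).1 y hy
    by_cases hgap : u - last > 1
    · refine ⟨?_, ?_, ?_⟩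
      · simp [pvLoopA, hgap]
      · simp only [pvLoopA, if_pos hgap, List.mem_cons]
        push Not
        constructor
        · omega
        · intro hmem; have := ht _ hmem; omega
      · intro k h1 h2; simp [pvLoopA, hgap] at h2; omega
    · have hueq : u = last + 1 := by omega
      have hrec : pvLoopA last (u :: t) = pvLoopA u t := by
        simp [pvLoopA, hgap]
      obtain ⟨ha, hb, hc⟩ := ih u (List.pairwise_cons.mp hs).2 ht
      rw [hrec]
      refine ⟨by omega, ?_, ?_⟩
      · simp only [List.mem_cons]; push Not
        exact ⟨by omega, hb⟩
      · intro k h1 h2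
        by_cases hk : k = u
        · simp [hk]
        · have : u < k := by omega
          exact List.mem_cons_of_mem _ (hc k this h2)

/-- B's upward walk returns the first integer above `n` missing from `s`,
provided the fuel outlasts the consecutive run (some `n + j + 1`, `j ≤ fuel`, is absent). -/
theorem pvLoopB_spec (fuel : Nat) (n : Int) (s : PySem.Set Int)
    (hfuel : ∃ j : Nat, j ≤ fuel ∧ (n + j + 1) ∉ s) :
    pvFirstFree n (· ∈ s) (pvLoopB fuel n s) := by
  induction fuel generalizing n with
  | zero =>
    obtain ⟨j, hj, hout⟩ := hfuel
    have hj0 : j = 0 := Nat.le_zero.mp hj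
    subst hj0
    refine ⟨by simp [pvLoopB], ?_, ?_⟩
    · simpa [pvLoopB] using hout
    · intro k h1 h2; simp [pvLoopB] at h2; omega
  | succ f ih =>
    by_cases hmem : n + 1 ∈ s
    · have hrec : pvLoopB (f + 1) n s = pvLoopB f (n + 1) s := by
        simp [pvLoopB, hmem]
      obtain ⟨j, hj, hout⟩ := hfuel
      have hjne : j ≠ 0 := by
        intro h; subst h; simp at hout; exact hout (by simpa using hmem)
      obtain ⟨j', rfl⟩ : ∃ j', j = j' + 1 := ⟨j - 1, by omega⟩
      have hfuel' : ∃ j : Nat, j ≤ f ∧ ((n + 1) + j + 1) ∉ s := by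
        refine ⟨j', by omega, ?_⟩
        convert hout using 2
        push_cast; ring
      obtain ⟨ha, hb, hc⟩ := ih (n + 1) hfuel'
      rw [hrec]
      refine ⟨by omega, hb, ?_⟩
      · intro k h1 h2
        by_cases hk : k = n + 1
        · simpa [hk] using hmem
        · exact hc k (by omega) h2
    · refine ⟨by simp [pvLoopB, hmem], by simpa [pvLoopB, hmem] using hmem, ?_⟩
      intro k h1 h2; simp [pvLoopB, hmem] at h2; omega

/-- Pigeonhole: a nodup list cannot contain all of `n+1, …, n+|s|+1`. -/
theorem pvFuel_enough (s : List Int) (n : Int) :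
    ∃ j : Nat, j ≤ s.length ∧ (n + j + 1) ∉ s := by
  by_contra hall
  push Not at hall
  have hsub : ((List.range (s.length + 1)).map (fun j : Nat => n + j + 1)) ⊆ s := by
    intro x hx
    simp only [List.mem_map, List.mem_range] at hx
    obtain ⟨j, hj, rfl⟩ := hx
    exact hall j (by omega)
  have hnd' : ((List.range (s.length + 1)).map (fun j : Nat => n + j + 1)).Nodup := by
    refine List.Nodup.map ?_ (List.nodup_range)
    intro a b hab
    simp only at hab
    omega
  have := (hnd'.subperm hsub).length_le
  simp at this

-- ===== VERDICT (by name: the statement is the Claim_ definition above) =====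
theorem find_unique_id_spec : Claim_equal_find_unique_id := by
  intro ids _
  unfold Spec_find_unique_id find_unique_id find_unique_id_alt
  by_cases hnil : ids = []
  · simp [hnil]
  · simp only [if_neg hnil]
    have hsne : PySem.Set.ofList ids ≠ [] := by
      intro h
      obtain ⟨x, hx⟩ := List.exists_mem_of_ne_nil ids hnil
      have : x ∈ PySem.Set.ofList ids := (PySem.Set.mem_ofList _ _).mpr hx
      simp [h] at this
    have hlne : PySem.List.sorted (PySem.Set.ofList ids) (fun x => x) false ≠ [] := by
      intro h
      exact hsne ((PySem.List.sorted_eq_nil_iff _ _ _).mp h)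
    obtain ⟨m', hm'⟩ : ∃ m', PySem.List.min? (PySem.Set.ofList ids) (fun x => x) = some m' := by
      cases h : PySem.List.min? (PySem.Set.ofList ids) (fun x => x) with
      | none => exact absurd ((PySem.List.min?_eq_none_iff _ _).mp h) hsne
      | some v => exact ⟨v, rfl⟩
    obtain ⟨m, hm⟩ : ∃ m, PySem.List.min? (PySem.List.sorted (PySem.Set.ofList ids) (fun x => x) false) (fun x => x) = some m := by
      cases h : PySem.List.min? (PySem.List.sorted (PySem.Set.ofList ids) (fun x => x) false) (fun x => x) with
      | none => exact absurd ((PySem.List.min?_eq_none_iff _ _).mp h) hlne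
      | some v => exact ⟨v, rfl⟩
    have hmeml : m ∈ PySem.List.sorted (PySem.Set.ofList ids) (fun x => x) false :=
      PySem.List.min?_mem hm
    have hmems : m' ∈ PySem.Set.ofList ids := PySem.List.min?_mem hm'
    have hmm : m = m' := by
      have h1 : m ≤ m' := PySem.List.min?_isMin hm m' ((PySem.List.mem_sorted _ _ _ _).mpr hmems)
      have h2 : m' ≤ m := PySem.List.min?_isMin hm' m ((PySem.List.mem_sorted _ _ _ _).mp hmeml)
      omega
    rw [hm, hm', ← hmm]
    by_cases hgt1 : m > 1
    · simp [hgt1]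
    · simp only [if_neg hgt1]
      -- head of the sorted list is the min
      have hpw : (PySem.List.sorted (PySem.Set.ofList ids) (fun x => x) false).Pairwise (· < ·) :=
        PySem.List.sorted_ofList_pairwise_lt ids
      obtain ⟨h, t, hht⟩ : ∃ h t, PySem.List.sorted (PySem.Set.ofList ids) (fun x => x) false = h :: t := by
        cases hc : PySem.List.sorted (PySem.Set.ofList ids) (fun x => x) false with
        | nil => exact absurd hc hlne
        | cons a b => exact ⟨a, b, rfl⟩
      have hhm : h = m := by
        have hhl : h ∈ PySem.List.sorted (PySem.Set.ofList ids) (fun x => x) false := by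
          rw [hht]; simp
        have h1 : m ≤ h := PySem.List.min?_isMin hm h hhl
        rw [hht] at hmeml
        rcases List.mem_cons.mp hmeml with hmh | hmt
        · omega
        · have : h < m := ((List.pairwise_cons.mp (hht ▸ hpw)).1) m hmt
          omega
      rw [hhm] at hht
      rw [hht] at hpw
      rw [hht]
      have hpwc := List.pairwise_cons.mp hpw
      have hA : pvFirstFree m (· ∈ PySem.Set.ofList ids) (pvLoopA m (m :: t)) := by
        have hstep : pvLoopA m (m :: t) = pvLoopA m t := by
          simp [pvLoopA]
        obtain ⟨ha, hb, hc⟩ := pvLoopA_spec t m hpwc.2 hpwc.1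
        rw [hstep]
        refine ⟨ha, ?_, ?_⟩
        · intro hmem
          have : pvLoopA m t ∈ m :: t := by
            rw [← hht]; exact (PySem.List.mem_sorted _ _ _ _).mpr hmem
          rcases List.mem_cons.mp this with h1 | h1
          · omega
          · exact hb h1
        · intro k h1 h2
          have : k ∈ m :: t := List.mem_cons_of_mem _ (hc k h1 h2)
          rw [← hht] at this
          exact (PySem.List.mem_sorted _ _ _ _).mp this
      have hB : pvFirstFree m (· ∈ PySem.Set.ofList ids)
          (pvLoopB (PySem.Set.ofList ids).length m (PySem.Set.ofList ids)) :=
        pvLoopB_spec _ m _ (pvFuel_enough _ m)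
      exact pvFirstFree_unique hA hB
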